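-- pv_equiv track=rewrite | github.com/BrynjarGeir/AdventOfCode | 2022/Day_18/Python/part1.py | findAllAirPockets
-- ===== SOURCE A (Python) =====
-- def allNeighboursCubes(cubes, cube):
--     return findNumNeighbours(cubes, cube) == 6
--
-- def findNumNeighbours(cubes, cube):
--     num = 0
--     neighbours = [[0, 0, -1], [0, 0, 1], [0, -1, 0], [0, 1, 0], [-1, 0, 0], [1, 0, 0]]
--
--     for neighbour in neighbours:
--         if (cube[0]+neighbour[0], cube[1]+neighbour[1], cube[2]+neighbour[2]) in cubes:
--             num += 1
--
--     return num
--
-- def findAllAirPockets(cubes):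
--     min_x, max_x, min_y, max_y, min_z, max_z = min([x[0] for x in cubes]), max([x[0] for x in cubes]), min([y[1] for y in cubes]), max([y[1] for y in cubes]), min([z[2] for z in cubes]), max([z[2] for z in cubes])
--     pockets = 0
--     for i in range(min_x, max_x+1):
--         for j in range(min_y, max_y+1):
--             for l in range(min_z, max_z+1):
--                 if (i, j, l) not in cubes and allNeighboursCubes(cubes, (i,j,l)):
--                     pockets += 1
--
--     return pockets
-- ===== SOURCE B (Python) =====
-- def findAllAirPockets(cubes):
--     cubeset = set(cubes)
--     dirs = [(0, 0, -1), (0, 0, 1), (0, -1, 0), (0, 1, 0), (-1, 0, 0), (1, 0, 0)]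
--     candidates = set()
--     for (x, y, z) in cubes:
--         for (dx, dy, dz) in dirs:
--             candidates.add((x + dx, y + dy, z + dz))
--     return sum(1 for c in candidates
--                if c not in cubeset
--                and all((c[0] + dx, c[1] + dy, c[2] + dz) in cubeset
--                        for (dx, dy, dz) in dirs))
-- ===== Notes on version B (the rewrite author's own statement) =====
-- stated objective: faster
-- what changed: Instead of scanning the whole bounding-box volume with linear list membership, B hashes the cubes into a set and tests only the deduplicated neighbour cells of cubes as pocket candidates (any cell with all six neighbours cubed is necessarily such a neighbour).
import Mathlib
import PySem

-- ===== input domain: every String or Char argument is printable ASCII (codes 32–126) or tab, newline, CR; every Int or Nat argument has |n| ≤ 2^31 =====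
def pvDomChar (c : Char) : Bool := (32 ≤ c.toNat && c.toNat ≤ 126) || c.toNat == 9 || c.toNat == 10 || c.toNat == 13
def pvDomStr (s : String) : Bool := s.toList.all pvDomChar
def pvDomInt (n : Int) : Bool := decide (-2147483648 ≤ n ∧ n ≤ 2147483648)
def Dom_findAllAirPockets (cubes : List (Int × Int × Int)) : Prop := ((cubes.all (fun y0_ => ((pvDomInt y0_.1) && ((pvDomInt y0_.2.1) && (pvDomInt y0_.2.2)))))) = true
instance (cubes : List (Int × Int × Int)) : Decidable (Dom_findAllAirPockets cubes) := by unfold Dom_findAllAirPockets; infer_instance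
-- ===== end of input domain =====

-- B replaces A's bounding-box volume scan (list membership per cell) by a hash set of the cubes
-- and checks only the deduplicated neighbour cells of cubes as pocket candidates (faster).


-- ===== PORT A =====
def pvNeighbours : List (Int × Int × Int) :=
  [(0, 0, -1), (0, 0, 1), (0, -1, 0), (0, 1, 0), (-1, 0, 0), (1, 0, 0)]

def findNumNeighbours (cubes : List (Int × Int × Int)) (cube : Int × Int × Int) : Int :=
  pvNeighbours.foldl (fun num n =>
    if cubes.contains (cube.1 + n.1, cube.2.1 + n.2.1, cube.2.2 + n.2.2) then num + 1 else num) 0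

def allNeighboursCubes (cubes : List (Int × Int × Int)) (cube : Int × Int × Int) : Bool :=
  findNumNeighbours cubes cube == 6

def findAllAirPockets (cubes : List (Int × Int × Int)) : Int :=
  match PySem.List.min? (cubes.map (·.1)) (fun v => v),
        PySem.List.max? (cubes.map (·.1)) (fun v => v),
        PySem.List.min? (cubes.map (·.2.1)) (fun v => v),
        PySem.List.max? (cubes.map (·.2.1)) (fun v => v),
        PySem.List.min? (cubes.map (·.2.2)) (fun v => v),
        PySem.List.max? (cubes.map (·.2.2)) (fun v => v) with
  | some min_x, some max_x, some min_y, some max_y, some min_z, some max_z =>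
    (PySem.List.pyRange min_x (max_x + 1) 1).foldl (fun pockets i =>
      (PySem.List.pyRange min_y (max_y + 1) 1).foldl (fun pockets j =>
        (PySem.List.pyRange min_z (max_z + 1) 1).foldl (fun pockets l =>
          if !cubes.contains (i, j, l) && allNeighboursCubes cubes (i, j, l)
          then pockets + 1 else pockets) pockets) pockets) 0
  | _, _, _, _, _, _ => 0  -- Python raises ValueError here (cubes = []); outside Pre_

-- ===== PORT B =====
-- (B reuses the same six direction offsets; in Source B the literal is repeated as 'dirs')
def findAllAirPockets_alt (cubes : List (Int × Int × Int)) : Int :=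
  let cubeset : PySem.Set (Int × Int × Int) := PySem.Set.ofList cubes
  let candidates : PySem.Set (Int × Int × Int) :=
    cubes.foldl (fun s c =>
      pvNeighbours.foldl (fun s d => PySem.Set.add s (c.1 + d.1, c.2.1 + d.2.1, c.2.2 + d.2.2)) s)
      PySem.Set.empty
  ((candidates.countP (fun c =>
      !PySem.Set.contains cubeset c &&
      pvNeighbours.all (fun d => PySem.Set.contains cubeset (c.1 + d.1, c.2.1 + d.2.1, c.2.2 + d.2.2)))
    : Int))

-- ===== PRECONDITION & SPEC =====
-- Pre_ excludes only the empty cube list, on which Python A raises ValueError (min() of an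
-- empty sequence); B's natural value there is 0.
def Pre_findAllAirPockets (cubes : List (Int × Int × Int)) : Prop := cubes ≠ []
instance (cubes : List (Int × Int × Int)) : Decidable (Pre_findAllAirPockets cubes) := by
  unfold Pre_findAllAirPockets; infer_instance

def pvWitness_findAllAirPockets : (List (Int × Int × Int)) := [(0, 0, 0), (2, 0, 0)]

def Spec_findAllAirPockets (cubes : List (Int × Int × Int)) (out : Int) : Prop := out = findAllAirPockets_alt cubes
instance (cubes : List (Int × Int × Int)) (out : Int) : Decidable (Spec_findAllAirPockets cubes out) := by unfold Spec_findAllAirPockets; infer_instance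

-- ===== CLAIM (what is proved, stated in full; the proofs are below) =====
def Claim_equal_findAllAirPockets : Prop := ∀ (cubes : List (Int × Int × Int)), Dom_findAllAirPockets cubes → Pre_findAllAirPockets cubes → Spec_findAllAirPockets cubes (findAllAirPockets cubes)


-- ===== LEMMAS AND PROOFS =====

-- the shifted cell c + d, as both ports compute it
def pvShift (c d : Int × Int × Int) : Int × Int × Int := (c.1 + d.1, c.2.1 + d.2.1, c.2.2 + d.2.2)

-- the common pocket test: c is not a cube and all six neighbours are
def pvGood (cubes : List (Int × Int × Int)) (c : Int × Int × Int) : Bool :=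
  !cubes.contains c && pvNeighbours.all (fun d => cubes.contains (pvShift c d))

-- A's search space as a list
def pvGrid (mnx mxx mny mxy mnz mxz : Int) : List (Int × Int × Int) :=
  (PySem.List.pyRange mnx (mxx + 1) 1).flatMap (fun i =>
    (PySem.List.pyRange mny (mxy + 1) 1).flatMap (fun j =>
      (PySem.List.pyRange mnz (mxz + 1) 1).map (fun l => (i, j, l))))

-- B's candidate set as a list
def pvCand (cubes : List (Int × Int × Int)) : List (Int × Int × Int) :=
  cubes.foldl (fun s c => pvNeighbours.foldl (fun s d => PySem.Set.add s (pvShift c d)) s) PySem.Set.empty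

lemma pvAllNbr (cubes : List (Int × Int × Int)) (c : Int × Int × Int) :
    allNeighboursCubes cubes c = pvNeighbours.all (fun d => cubes.contains (pvShift c d)) := by
  have hfold : findNumNeighbours cubes c =
      (pvNeighbours.countP (fun d => cubes.contains (pvShift c d)) : Int) := by
    unfold findNumNeighbours
    rw [show (fun (num : Int) (n : Int × Int × Int) =>
          if cubes.contains (c.1 + n.1, c.2.1 + n.2.1, c.2.2 + n.2.2) then num + 1 else num)
        = (fun num n => if (fun d => cubes.contains (pvShift c d)) n then num + 1 else num) from rfl]
    rw [PySem.List.foldl_if_add_one]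
    simp
  unfold allNeighboursCubes
  rw [hfold]
  by_cases hall : pvNeighbours.all (fun d => cubes.contains (pvShift c d)) = true
  · rw [hall]
    have : pvNeighbours.countP (fun d => cubes.contains (pvShift c d)) = 6 := by
      have := List.all_eq_true.mp hall
      rw [List.countP_eq_length.mpr fun a ha => this a ha]
      rfl
    rw [this]; rfl
  · rw [Bool.eq_false_iff.mpr hall]
    have hne : pvNeighbours.countP (fun d => cubes.contains (pvShift c d)) ≠ 6 := by
      intro h6
      exact hall (List.all_eq_true.mpr (List.countP_eq_length.mp (by rw [h6]; rfl)))
    simp only [beq_eq_false_iff_ne, ne_eq]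
    intro h; exact hne (by exact_mod_cast h)

lemma pvA_eq_countP (cubes : List (Int × Int × Int)) (mnx mxx mny mxy mnz mxz : Int)
    (h1 : PySem.List.min? (cubes.map (·.1)) (fun v => v) = some mnx)
    (h2 : PySem.List.max? (cubes.map (·.1)) (fun v => v) = some mxx)
    (h3 : PySem.List.min? (cubes.map (·.2.1)) (fun v => v) = some mny)
    (h4 : PySem.List.max? (cubes.map (·.2.1)) (fun v => v) = some mxy)
    (h5 : PySem.List.min? (cubes.map (·.2.2)) (fun v => v) = some mnz)
    (h6 : PySem.List.max? (cubes.map (·.2.2)) (fun v => v) = some mxz) :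
    findAllAirPockets cubes = ((pvGrid mnx mxx mny mxy mnz mxz).countP (pvGood cubes) : Int) := by
  unfold findAllAirPockets
  simp only [h1, h2, h3, h4, h5, h6]
  simp only [pvAllNbr, PySem.List.foldl_if_add_one, PySem.List.foldl_add, zero_add]
  unfold pvGrid pvGood
  simp [Function.comp_def, List.countP_flatMap, List.countP_map, Nat.cast_list_sum, List.map_map]

lemma pvB_eq_countP (cubes : List (Int × Int × Int)) :
    findAllAirPockets_alt cubes = ((pvCand cubes).countP (pvGood cubes) : Int) := by
  unfold findAllAirPockets_alt pvCand
  simp only [pvShift]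
  congr 1
  apply List.countP_congr
  intro c hc
  simp [pvGood, pvNeighbours, pvNeighbours, pvShift]

lemma pvNodup_foldl_add {a b : Type} [BEq a] [LawfulBEq a] (l : List b) (f : b → a)
    (s : PySem.Set a) (h : s.Nodup) : (l.foldl (fun s x => PySem.Set.add s (f x)) s).Nodup := by
  induction l generalizing s with
  | nil => exact h
  | cons x t ih => exact ih _ (PySem.Set.nodup_add s (f x) h)

lemma pvNodup_cand (cubes : List (Int × Int × Int)) : (pvCand cubes).Nodup := by
  unfold pvCand
  generalize hs : (PySem.Set.empty : PySem.Set (Int × Int × Int)) = s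
  have h : s.Nodup := by rw [← hs]; exact List.nodup_nil
  clear hs
  induction cubes generalizing s with
  | nil => exact h
  | cons x t ih => exact ih _ (pvNodup_foldl_add pvNeighbours (pvShift x) s h)

lemma pvMem_candAux (cubes : List (Int × Int × Int)) (s : PySem.Set (Int × Int × Int))
    (y : Int × Int × Int) :
    y ∈ cubes.foldl (fun s c => pvNeighbours.foldl (fun s d => PySem.Set.add s (pvShift c d)) s) s ↔
      y ∈ s ∨ ∃ c ∈ cubes, ∃ d ∈ pvNeighbours, y = pvShift c d := by
  induction cubes generalizing s with
  | nil => simp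
  | cons x t ih =>
    rw [List.foldl_cons, ih, PySem.Set.mem_foldl_add]
    constructor
    · rintro (⟨hy | ⟨d, hd, rfl⟩⟩ | ⟨c, hc, d, hd, rfl⟩)
      · exact Or.inl hy
      · exact Or.inr ⟨x, List.mem_cons_self, d, hd, rfl⟩
      · exact Or.inr ⟨c, List.mem_cons_of_mem _ hc, d, hd, rfl⟩
    · rintro (hy | ⟨c, hc, d, hd, rfl⟩)
      · exact Or.inl (Or.inl hy)
      · rcases List.mem_cons.mp hc with rfl | hc
        · exact Or.inl (Or.inr ⟨d, hd, rfl⟩)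
        · exact Or.inr ⟨c, hc, d, hd, rfl⟩

lemma pvMem_cand (cubes : List (Int × Int × Int)) (y : Int × Int × Int) :
    y ∈ pvCand cubes ↔ ∃ c ∈ cubes, ∃ d ∈ pvNeighbours, y = pvShift c d := by
  unfold pvCand
  rw [pvMem_candAux]
  simp [PySem.Set.empty, pvNeighbours, pvNeighbours]

lemma pvNodup_grid (mnx mxx mny mxy mnz mxz : Int) : (pvGrid mnx mxx mny mxy mnz mxz).Nodup := by
  unfold pvGrid
  rw [List.nodup_flatMap]
  refine ⟨fun i _ => ?_, ?_⟩
  · rw [List.nodup_flatMap]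
    refine ⟨fun j _ => (PySem.List.nodup_pyRange_one _ _).map fun a b hab => ?_, ?_⟩
    · simpa [Prod.ext_iff] using hab
    · refine ((PySem.List.nodup_pyRange_one _ _)).imp ?_
      intro j j' hne p hp hp'
      simp only [List.mem_map] at hp hp'
      obtain ⟨l, _, rfl⟩ := hp
      obtain ⟨l', _, h⟩ := hp'
      obtain ⟨h1, h2, h3⟩ := (by simpa [Prod.ext_iff] using h.symm : i = i ∧ j = j' ∧ l = l')
      exact hne h2
  · refine ((PySem.List.nodup_pyRange_one _ _)).imp ?_
    intro i i' hne p hp hp'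
    simp only [List.mem_flatMap, List.mem_map] at hp hp'
    obtain ⟨j, _, l, _, rfl⟩ := hp
    obtain ⟨j', _, l', _, h⟩ := hp'
    obtain ⟨h1, h2, h3⟩ := (by simpa [Prod.ext_iff] using h.symm : i = i' ∧ j = j' ∧ l = l')
    exact hne h1

lemma pvMem_grid (mnx mxx mny mxy mnz mxz : Int) (c : Int × Int × Int) :
    c ∈ pvGrid mnx mxx mny mxy mnz mxz ↔
      (mnx ≤ c.1 ∧ c.1 < mxx + 1) ∧ (mny ≤ c.2.1 ∧ c.2.1 < mxy + 1) ∧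
      (mnz ≤ c.2.2 ∧ c.2.2 < mxz + 1) := by
  obtain ⟨x, y, z⟩ := c
  simp [pvGrid, List.mem_flatMap, PySem.List.mem_pyRange_one]

lemma pvGood_nbrs (cubes : List (Int × Int × Int)) (c : Int × Int × Int)
    (h : pvGood cubes c = true) :
    (c.1, c.2.1, c.2.2 - 1) ∈ cubes ∧ (c.1, c.2.1, c.2.2 + 1) ∈ cubes ∧
    (c.1, c.2.1 - 1, c.2.2) ∈ cubes ∧ (c.1, c.2.1 + 1, c.2.2) ∈ cubes ∧
    (c.1 - 1, c.2.1, c.2.2) ∈ cubes ∧ (c.1 + 1, c.2.1, c.2.2) ∈ cubes := by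
  simp only [pvGood, pvNeighbours, pvShift, List.all_cons, List.all_nil, Bool.and_true,
    Bool.and_eq_true, List.contains_iff_mem] at h
  obtain ⟨-, hzm, hzp, hym, hyp, hxm, hxp⟩ := h
  refine ⟨?_, ?_, ?_, ?_, ?_, ?_⟩
  · rw [show ((c.1, c.2.1, c.2.2 - 1) : Int × Int × Int) = (c.1 + 0, c.2.1 + 0, c.2.2 + -1) from by
      simp [Prod.ext_iff]; ring]; exact hzm
  · rw [show ((c.1, c.2.1, c.2.2 + 1) : Int × Int × Int) = (c.1 + 0, c.2.1 + 0, c.2.2 + 1) from by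
      simp]; exact hzp
  · rw [show ((c.1, c.2.1 - 1, c.2.2) : Int × Int × Int) = (c.1 + 0, c.2.1 + -1, c.2.2 + 0) from by
      simp [Prod.ext_iff]; ring]; exact hym
  · rw [show ((c.1, c.2.1 + 1, c.2.2) : Int × Int × Int) = (c.1 + 0, c.2.1 + 1, c.2.2 + 0) from by
      simp]; exact hyp
  · rw [show ((c.1 - 1, c.2.1, c.2.2) : Int × Int × Int) = (c.1 + -1, c.2.1 + 0, c.2.2 + 0) from by
      simp [Prod.ext_iff]; ring]; exact hxm
  · rw [show ((c.1 + 1, c.2.1, c.2.2) : Int × Int × Int) = (c.1 + 1, c.2.1 + 0, c.2.2 + 0) from by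
      simp]; exact hxp

lemma pvCountP_eq_of_nodup {a : Type} (p : a → Bool) (l1 l2 : List a)
    (h1 : l1.Nodup) (h2 : l2.Nodup) (h : ∀ c, p c = true → (c ∈ l1 ↔ c ∈ l2)) :
    l1.countP p = l2.countP p := by
  rw [List.countP_eq_length_filter, List.countP_eq_length_filter]
  refine List.Perm.length_eq ?_
  refine (List.subperm_of_subset (h1.filter p) ?_).antisymm (List.subperm_of_subset (h2.filter p) ?_) <;>
    intro x hx <;> rw [List.mem_filter] at hx ⊢ <;>
    exact ⟨by first | exact (h x hx.2).mp hx.1 | exact (h x hx.2).mpr hx.1, hx.2⟩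


-- ===== VERDICT (by name: the statement is the Claim_ definition above) =====
theorem findAllAirPockets_spec : Claim_equal_findAllAirPockets := by
  intro cubes hdom hpre
  unfold Spec_findAllAirPockets
  rcases hx1 : PySem.List.min? (cubes.map (·.1)) (fun v => v) with _ | mnx
  · exact absurd (by simpa using (PySem.List.min?_eq_none_iff _ _).mp hx1) hpre
  rcases hx2 : PySem.List.max? (cubes.map (·.1)) (fun v => v) with _ | mxx
  · exact absurd (by simpa using (PySem.List.max?_eq_none_iff _ _).mp hx2) hpre
  rcases hy1 : PySem.List.min? (cubes.map (·.2.1)) (fun v => v) with _ | mny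
  · exact absurd (by simpa using (PySem.List.min?_eq_none_iff _ _).mp hy1) hpre
  rcases hy2 : PySem.List.max? (cubes.map (·.2.1)) (fun v => v) with _ | mxy
  · exact absurd (by simpa using (PySem.List.max?_eq_none_iff _ _).mp hy2) hpre
  rcases hz1 : PySem.List.min? (cubes.map (·.2.2)) (fun v => v) with _ | mnz
  · exact absurd (by simpa using (PySem.List.min?_eq_none_iff _ _).mp hz1) hpre
  rcases hz2 : PySem.List.max? (cubes.map (·.2.2)) (fun v => v) with _ | mxz
  · exact absurd (by simpa using (PySem.List.max?_eq_none_iff _ _).mp hz2) hpre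
  rw [pvA_eq_countP cubes mnx mxx mny mxy mnz mxz hx1 hx2 hy1 hy2 hz1 hz2, pvB_eq_countP]
  congr 1
  apply pvCountP_eq_of_nodup _ _ _ (pvNodup_grid mnx mxx mny mxy mnz mxz) (pvNodup_cand cubes)
  intro c hc
  obtain ⟨hzm, hzp, hym, hyp, hxm, hxp⟩ := pvGood_nbrs cubes c hc
  have hcand : c ∈ pvCand cubes := by
    rw [pvMem_cand]
    refine ⟨(c.1 - 1, c.2.1, c.2.2), hxm, (1, 0, 0), by simp [pvNeighbours], ?_⟩
    simp [pvShift]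
  have hgrid : c ∈ pvGrid mnx mxx mny mxy mnz mxz := by
    rw [pvMem_grid]
    have b1 : mnx ≤ c.1 - 1 :=
      PySem.List.min?_isMin hx1 _ (List.mem_map_of_mem (f := (·.1)) hxm)
    have b2 : c.1 + 1 ≤ mxx :=
      PySem.List.max?_isMax hx2 _ (List.mem_map_of_mem (f := (·.1)) hxp)
    have b3 : mny ≤ c.2.1 - 1 :=
      PySem.List.min?_isMin hy1 _ (List.mem_map_of_mem (f := (·.2.1)) hym)
    have b4 : c.2.1 + 1 ≤ mxy :=
      PySem.List.max?_isMax hy2 _ (List.mem_map_of_mem (f := (·.2.1)) hyp)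
    have b5 : mnz ≤ c.2.2 - 1 :=
      PySem.List.min?_isMin hz1 _ (List.mem_map_of_mem (f := (·.2.2)) hzm)
    have b6 : c.2.2 + 1 ≤ mxz :=
      PySem.List.max?_isMax hz2 _ (List.mem_map_of_mem (f := (·.2.2)) hzp)
    exact ⟨⟨by omega, by omega⟩, ⟨by omega, by omega⟩, by omega, by omega⟩
  exact ⟨fun _ => hcand, fun _ => hgrid⟩
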